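-- pv_equiv track=rewrite | github.com/Kerry2002/OA-Prep | Add_number.py | add_number
-- ===== SOURCE A (Python) =====
-- def add_number (number):
--     if number <0: return None
--     result = 0
--     for num in range (number+1):
--         if num % 5 == 0 or num % 7 == 0:
--             continue
--         result = result +num
--     return result
-- ===== SOURCE B (Python) =====
-- def add_number(number):
--     # Closed-form: arithmetic series with inclusion-exclusion over multiples of 5, 7, 35.
--     if number < 0:
--         return None
--     def tri(k):
--         return k * (k + 1) // 2
--     return (tri(number)
--             - 5 * tri(number // 5)
--             - 7 * tri(number // 7)
--             + 35 * tri(number // 35))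
-- ===== Notes on version B (the rewrite author's own statement) =====
-- stated objective: faster
-- what changed: Replaced the O(n) loop over range(number+1) by a closed-form arithmetic-series formula with inclusion-exclusion over multiples of 5, 7 and 35.
import Mathlib
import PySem

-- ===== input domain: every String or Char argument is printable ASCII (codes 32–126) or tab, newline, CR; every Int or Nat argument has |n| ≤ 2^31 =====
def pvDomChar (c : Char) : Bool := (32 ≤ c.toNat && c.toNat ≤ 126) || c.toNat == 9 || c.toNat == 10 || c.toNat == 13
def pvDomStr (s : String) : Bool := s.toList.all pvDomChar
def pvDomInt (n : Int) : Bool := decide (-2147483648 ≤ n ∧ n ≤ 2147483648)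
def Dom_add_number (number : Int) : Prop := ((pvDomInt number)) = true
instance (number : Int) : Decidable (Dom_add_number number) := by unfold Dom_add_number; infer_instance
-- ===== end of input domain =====

-- ===== PORT A =====
-- B replaces A's linear loop by a closed-form inclusion-exclusion formula (objective: faster).
def add_number (number : Int) : Option Int :=
  if number < 0 then none
  else
    some ((PySem.List.pyRange 0 (number + 1) 1).foldl
      (fun result num =>
        if PySem.Int.mod num 5 == 0 || PySem.Int.mod num 7 == 0 then result
        else result + num) 0)

-- ===== PORT B =====
def pvTri (k : Int) : Int := PySem.Int.floordiv (k * (k + 1)) 2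

def add_number_alt (number : Int) : Option Int :=
  if number < 0 then none
  else
    some (pvTri number
          - 5 * pvTri (PySem.Int.floordiv number 5)
          - 7 * pvTri (PySem.Int.floordiv number 7)
          + 35 * pvTri (PySem.Int.floordiv number 35))

-- ===== PRECONDITION & SPEC =====
def Spec_add_number (number : Int) (out : Option Int) : Prop := out = add_number_alt number
instance (number : Int) (out : Option Int) : Decidable (Spec_add_number number out) := by unfold Spec_add_number; infer_instance

-- ===== CLAIM (what is proved, stated in full; the proofs are below) =====
def Claim_equal_add_number : Prop := ∀ (number : Int), Dom_add_number number → Spec_add_number number (add_number number)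

-- ===== LEMMAS AND PROOFS =====
def pvC (n : Int) : Int :=
  pvTri n - 5 * pvTri (PySem.Int.floordiv n 5) - 7 * pvTri (PySem.Int.floordiv n 7)
    + 35 * pvTri (PySem.Int.floordiv n 35)

lemma pvTri_eq (k : Int) : pvTri k = k * (k + 1) / 2 := by
  unfold pvTri
  exact PySem.Int.floordiv_eq_ediv_of_pos (by norm_num)

lemma pvTri_succ (q : Int) : pvTri (q + 1) = pvTri q + (q + 1) := by
  rw [pvTri_eq, pvTri_eq]
  have h : (q + 1) * (q + 1 + 1) = q * (q + 1) + 2 * (q + 1) := by ring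
  rw [h]
  omega

lemma pvFd (n : Int) (d : Int) (hd : d = 5 ∨ d = 7 ∨ d = 35) :
    PySem.Int.floordiv (n + 1) d = PySem.Int.floordiv n d + (if d ∣ (n + 1) then 1 else 0) := by
  have hd' : (0:Int) < d := by rcases hd with h | h | h <;> simp [h]
  rw [PySem.Int.floordiv_eq_ediv_of_pos hd', PySem.Int.floordiv_eq_ediv_of_pos hd']
  rcases hd with h | h | h <;> subst h <;> split_ifs with h <;> omega

lemma pvC_succ (n : Int) :
    pvC (n + 1) = pvC n + (if (5:Int) ∣ (n + 1) ∨ (7:Int) ∣ (n + 1) then 0 else n + 1) := by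
  have h5 := pvFd n 5 (Or.inl rfl)
  have h7 := pvFd n 7 (Or.inr (Or.inl rfl))
  have h35 := pvFd n 35 (Or.inr (Or.inr rfl))
  have E5 : PySem.Int.floordiv n 5 = n / 5 := PySem.Int.floordiv_eq_ediv_of_pos (by norm_num)
  have E7 : PySem.Int.floordiv n 7 = n / 7 := PySem.Int.floordiv_eq_ediv_of_pos (by norm_num)
  have E35 : PySem.Int.floordiv n 35 = n / 35 := PySem.Int.floordiv_eq_ediv_of_pos (by norm_num)
  have hd35 : ((35:Int) ∣ (n + 1)) ↔ ((5:Int) ∣ (n + 1) ∧ (7:Int) ∣ (n + 1)) := by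
    constructor
    · intro h
      exact ⟨dvd_trans (by norm_num) h, dvd_trans (by norm_num) h⟩
    · rintro ⟨⟨a, ha⟩, ⟨b, hb⟩⟩
      omega
  unfold pvC
  by_cases c5 : (5:Int) ∣ (n + 1) <;> by_cases c7 : (7:Int) ∣ (n + 1)
  · rw [if_pos (Or.inl c5)]
    rw [if_pos c5] at h5
    rw [if_pos c7] at h7
    rw [if_pos (hd35.mpr ⟨c5, c7⟩)] at h35
    rw [h5, h7, h35, pvTri_succ, pvTri_succ, pvTri_succ, pvTri_succ, E5, E7, E35]
    generalize pvTri n = t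
    generalize pvTri (n / 5) = a
    generalize pvTri (n / 7) = b
    generalize pvTri (n / 35) = c
    omega
  · rw [if_pos (Or.inl c5)]
    rw [if_pos c5] at h5
    rw [if_neg c7] at h7
    rw [if_neg (fun h => c7 (hd35.mp h).2)] at h35
    rw [h5, h7, h35, add_zero, add_zero, pvTri_succ, pvTri_succ, E5, E7, E35]
    generalize pvTri n = t
    generalize pvTri (n / 5) = a
    omega
  · rw [if_pos (Or.inr c7)]
    rw [if_neg c5] at h5
    rw [if_pos c7] at h7
    rw [if_neg (fun h => c5 (hd35.mp h).1)] at h35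
    rw [h5, h7, h35, add_zero, add_zero, pvTri_succ, pvTri_succ, E5, E7, E35]
    generalize pvTri n = t
    generalize pvTri (n / 7) = b
    omega
  · rw [if_neg (by tauto : ¬ ((5:Int) ∣ (n + 1) ∨ (7:Int) ∣ (n + 1)))]
    rw [if_neg c5] at h5
    rw [if_neg c7] at h7
    rw [if_neg (fun h => c5 (hd35.mp h).1)] at h35
    rw [h5, h7, h35, add_zero, add_zero, add_zero, pvTri_succ]
    ring

def pvF : Int → Int → Int := fun result num =>
  if PySem.Int.mod num 5 == 0 || PySem.Int.mod num 7 == 0 then result else result + num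

lemma pvCond (m : Int) :
    (PySem.Int.mod m 5 == 0 || PySem.Int.mod m 7 == 0) = true ↔ ((5:Int) ∣ m ∨ (7:Int) ∣ m) := by
  rw [PySem.Int.mod_eq_emod_of_pos (by norm_num : (0:Int) < 5),
      PySem.Int.mod_eq_emod_of_pos (by norm_num : (0:Int) < 7)]
  simp only [Bool.or_eq_true, beq_iff_eq]
  omega

lemma pvLoop (n : Nat) :
    (PySem.List.pyRange 0 ((n : Int) + 1) 1).foldl pvF 0 = pvC (n : Int) := by
  induction n with
  | zero =>
    rw [PySem.List.pyRange_one_cons (by norm_num), PySem.List.pyRange_one_eq_nil (by norm_num)]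
    decide
  | succ m ih =>
    have hc : ((m + 1 : Nat) : Int) = (m : Int) + 1 := by push_cast; ring
    rw [hc, PySem.List.pyRange_one_succ_right (by positivity), List.foldl_append, ih,
      pvC_succ (m : Int)]
    simp only [List.foldl, pvF]
    by_cases h : (5:Int) ∣ ((m : Int) + 1) ∨ (7:Int) ∣ ((m : Int) + 1)
    · rw [if_pos ((pvCond _).mpr h), if_pos h]
      ring
    · rw [if_neg (by simpa using fun hh => h ((pvCond _).mp hh)), if_neg h]

-- ===== VERDICT (by name: the statement is the Claim_ definition above) =====
theorem add_number_spec : Claim_equal_add_number := by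
  intro number _
  unfold Spec_add_number add_number add_number_alt
  split_ifs with h
  · rfl
  · obtain ⟨n, rfl⟩ := Int.eq_ofNat_of_zero_le (by omega : 0 ≤ number)
    rw [show ((PySem.List.pyRange 0 ((n:Int) + 1) 1).foldl
        (fun result num => if PySem.Int.mod num 5 == 0 || PySem.Int.mod num 7 == 0 then result
          else result + num) 0) = (PySem.List.pyRange 0 ((n:Int) + 1) 1).foldl pvF 0 from rfl,
      pvLoop n]
    rfl
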